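-- pv_equiv track=rewrite | github.com/FancyLivin/AdventOfCodeChallenges | 2023/day_9/main.py | create_difference_pyramid
-- ===== SOURCE A (Python) =====
-- def create_difference_pyramid(line) -> list:
--     extrapolated = [[int(num) for num in (line.rstrip('\n').split())]]
--     while any(num != 0 for num in extrapolated[-1]):
--         mini_list = []
--         for index in range(len(extrapolated[-1]) - 1):
--             num_one = extrapolated[-1][index]
--             num_two = extrapolated[-1][index + 1]
--             difference = num_two - num_one
--             mini_list.append(difference)
--         extrapolated.append(mini_list)
--     return extrapolated
-- ===== SOURCE B (Python) =====
-- def create_difference_pyramid(line) -> list: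
--     def pyramid(row):
--         if all(num == 0 for num in row):
--             return [row]
--         return [row] + pyramid([b - a for a, b in zip(row, row[1:])])
--     return pyramid([int(num) for num in line.rstrip('\n').split()])
-- ===== Notes on version B (the rewrite author's own statement) =====
-- stated objective: simpler
-- what changed: Replaces the while-loop that appends index-computed difference rows to a growing list with a recursive helper that prepends the current row to the pyramid of its zip-based adjacent-difference row.
import Mathlib
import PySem

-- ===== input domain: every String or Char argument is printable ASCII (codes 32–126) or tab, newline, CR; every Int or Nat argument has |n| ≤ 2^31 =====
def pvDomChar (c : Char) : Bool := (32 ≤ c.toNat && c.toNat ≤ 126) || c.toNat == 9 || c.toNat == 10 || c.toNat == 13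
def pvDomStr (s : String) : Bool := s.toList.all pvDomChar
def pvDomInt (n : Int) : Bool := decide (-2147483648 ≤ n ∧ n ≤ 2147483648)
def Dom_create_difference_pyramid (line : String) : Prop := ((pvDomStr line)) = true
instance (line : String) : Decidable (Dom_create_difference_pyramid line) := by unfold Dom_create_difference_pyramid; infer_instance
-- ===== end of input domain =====

-- B replaces A's while-loop appending index-computed difference rows with a recursive helper
-- prepending the row to the pyramid of its zip-based adjacent-difference row (objective: simpler).

-- shared first step of both sources: strip trailing newline characters, then whitespace-split
-- (rstrip with an explicit chars argument is ported by hand: drop trailing newline characters; exact)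
def pvTokens (line : String) : List String :=
  PySem.Str.split₀ (String.ofList ((line.toList.reverse.dropWhile (· == '\n')).reverse))

-- the int() list comprehension over the tokens; int() failure (ValueError) is excluded by Pre_,
-- so the default 0 is never observed on admitted inputs
def pvParse (line : String) : List Int :=
  (pvTokens line).map (fun num => (PySem.Int.ofStr? num).getD 0)

-- ===== PORT A =====
-- the inner for-loop over range(len(extrapolated[-1]) - 1) building mini_list
def diffRowA (last : List Int) : List Int :=
  (PySem.List.pyRange 0 (PySem.List.len last - 1)).foldl
    (fun mini_list index =>
      let num_one := PySem.List.pyGetD last index 0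
      let num_two := PySem.List.pyGetD last (index + 1) 0
      let difference := num_two - num_one
      mini_list ++ [difference]) []

theorem diffRowA_eq_map (l : List Int) :
    diffRowA l = (List.range (l.length - 1)).map
      (fun (k : Nat) => PySem.List.pyGetD l ((k : Int) + 1) 0 - PySem.List.pyGetD l (k : Int) 0) := by
  have hsing : ∀ (g : Nat → Int) (xs : List Nat), (xs.flatMap fun a => [g a]) = xs.map g :=
    fun g xs => (List.map_eq_flatMap ..).symm
  simp only [diffRowA, PySem.List.pyRange_one, PySem.List.len, List.foldl_map,
    PySem.List.foldl_append_eq_flatMap, List.nil_append]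
  rw [hsing]
  simp only [zero_add]
  rw [show ((l.length : Int) - 1 - 0).toNat = l.length - 1 by omega]

theorem length_diffRowA (l : List Int) : (diffRowA l).length = l.length - 1 := by
  simp [diffRowA_eq_map]

-- the while-loop; `last` tracks extrapolated[-1]
def loopA (extrapolated : List (List Int)) (last : List Int) : List (List Int) :=
  if last.any (fun num => num != 0) then
    let mini_list := diffRowA last
    loopA (extrapolated ++ [mini_list]) mini_list
  else extrapolated
termination_by last.length
decreasing_by
  rename_i h
  have hne : last ≠ [] := by rintro rfl; simp at h
  have := length_diffRowA last
  have : 0 < last.length := List.length_pos_iff.mpr hne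
  omega

def create_difference_pyramid (line : String) : List (List Int) :=
  let row := pvParse line
  loopA [row] row

-- ===== PORT B =====
def pyramidB (row : List Int) : List (List Int) :=
  if row.all (fun num => num == 0) then [row]
  else row :: pyramidB ((row.zip (PySem.List.slice row (some 1))).map (fun p => p.2 - p.1))
termination_by row.length
decreasing_by
  rename_i h
  have hne : row ≠ [] := by rintro rfl; simp at h
  have h1 : PySem.List.slice row (some 1) = row.drop 1 := PySem.List.slice_from row (by norm_num)
  have : 0 < row.length := List.length_pos_iff.mpr hne
  simp [h1]
  omega

def create_difference_pyramid_alt (line : String) : List (List Int) :=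
  pyramidB (pvParse line)

-- ===== PRECONDITION & SPEC =====
-- Pre_ excludes exactly the inputs on which Python's int() raises ValueError on some
-- whitespace-separated token of the newline-stripped line (both A and B raise there).
def Pre_create_difference_pyramid (line : String) : Prop :=
  ((pvTokens line).all (fun t => (PySem.Int.ofStr? t).isSome)) = true
instance (line : String) : Decidable (Pre_create_difference_pyramid line) := by
  unfold Pre_create_difference_pyramid; infer_instance

def pvWitness_create_difference_pyramid : String := "0 3 6 9 12 15"

def Spec_create_difference_pyramid (line : String) (out : List (List Int)) : Prop := out = create_difference_pyramid_alt line
instance (line : String) (out : List (List Int)) : Decidable (Spec_create_difference_pyramid line out) := by unfold Spec_create_difference_pyramid; infer_instance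

-- ===== CLAIM (what is proved, stated in full; the proofs are below) =====
def Claim_equal_create_difference_pyramid : Prop := ∀ (line : String), Dom_create_difference_pyramid line → Pre_create_difference_pyramid line → Spec_create_difference_pyramid line (create_difference_pyramid line)

-- ===== LEMMAS AND PROOFS =====

-- A's index-built difference row equals B's zip-built difference row
theorem diffRow_eq (l : List Int) :
    diffRowA l = (l.zip (PySem.List.slice l (some 1))).map (fun p => p.2 - p.1) := by
  rw [PySem.List.slice_from l (by norm_num : (0:Int) <= 1), diffRowA_eq_map]
  apply List.ext_getElem
  · simp
  · intro i h1 h2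
    have hi : i < l.length - 1 := by simpa using h1
    simp only [List.getElem_map, List.getElem_range, List.getElem_zip, List.getElem_drop]
    rw [PySem.List.pyGetD_eq_getElem l 0 (by positivity) (by omega),
        PySem.List.pyGetD_eq_getElem l 0 (by positivity) (by omega)]
    congr 1 <;> congr 1 <;> omega

theorem loopA_eq (n : ℕ) (r : List Int) (hn : r.length = n) (acc : List (List Int)) :
    loopA (acc ++ [r]) r = acc ++ pyramidB r := by
  induction n using Nat.strong_induction_on generalizing r acc with
  | _ n ih =>
    rw [loopA, pyramidB]
    by_cases h : r.any (fun num => num != 0)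
    · have hall : (r.all (fun num => num == 0)) = false := by
        simpa [List.all_eq_not_any_not] using h
      have hne : r ≠ [] := by rintro rfl; simp at h
      rw [if_pos h, if_neg (by simp [hall])]
      have hlen : (diffRowA r).length < n := by
        have := length_diffRowA r
        have : 0 < r.length := List.length_pos_iff.mpr hne
        omega
      show loopA ((acc ++ [r]) ++ [diffRowA r]) (diffRowA r) = acc ++ r :: pyramidB _
      rw [ih _ hlen _ rfl, diffRow_eq]
      simp
    · have hall : (r.all (fun num => num == 0)) = true := by
        simpa [List.all_eq_not_any_not] using h
      rw [if_neg h, if_pos hall]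

-- ===== VERDICT (by name: the statement is the Claim_ definition above) =====
theorem create_difference_pyramid_spec : Claim_equal_create_difference_pyramid := by
  intro line _ _
  unfold Spec_create_difference_pyramid create_difference_pyramid create_difference_pyramid_alt
  simpa using loopA_eq (pvParse line).length (pvParse line) rfl []
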